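-- pv_equiv track=rewrite | github.com/AdrianSuliga/WDI | 06_Recursion/ex_19.py | URKing
-- ===== SOURCE A (Python) =====
-- def URKing(w, k, T):
--     n = len(T)
--     if w == 0 and k == n - 1: return True
--     if w >= n or k >= n: return False
--
--     k1, k2, k3 = False, False, False
--     if -1 < w - 1 < n and -1 < k + 1 < n and canMove(T[w][k], T[w - 1][k + 1]):
--         k1 = URKing(w - 1, k + 1, T)
--     if -1 < w - 1 < n and -1 < k < n and canMove(T[w][k], T[w - 1][k]):
--         k2 = URKing(w - 1, k, T)
--     if -1 < w < n and -1 < k + 1 < n and canMove(T[w][k], T[w][k + 1]):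
--         k3 = URKing(w, k + 1, T)
--     return k1 or k2 or k3
--
-- def canMove(n1, n2):
--     x1, x2 = n1 % 10, 0
--     while n2 != 0:
--         x2 = n2 % 10
--         n2 //= 10
--     if x1 < x2: return True
--     return False
-- ===== SOURCE B (Python) =====
-- def canMove(n1, n2):
--     lead = n2
--     while lead >= 10:
--         lead //= 10
--     return n1 % 10 < lead
--
-- def URKing(w, k, T):
--     n = len(T)
--     if not (0 <= w < n and 0 <= k < n):
--         return False
--     reach = [[False] * n for _ in range(n)]
--     for i in range(n):
--         for j in range(n - 1, -1, -1):
--             if i == 0 and j == n - 1: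
--                 reach[i][j] = True
--             else:
--                 reach[i][j] = (
--                     (i >= 1 and j + 1 < n and canMove(T[i][j], T[i - 1][j + 1]) and reach[i - 1][j + 1])
--                     or (i >= 1 and canMove(T[i][j], T[i - 1][j]) and reach[i - 1][j])
--                     or (j + 1 < n and canMove(T[i][j], T[i][j + 1]) and reach[i][j + 1])
--                 )
--     return reach[w][k]
-- ===== Notes on version B (the rewrite author's own statement) =====
-- stated objective: alternative
-- what changed: A explores move sequences by plain three-way recursion; B builds an n-by-n reachability table bottom-up (rows top to bottom, columns right to left) and answers by one lookup.
-- outside the precondition, e.g. on URKing(1, -1, [[5, 9], [9, 3]]): A returns True, B returns False; on URKing(0, 0, [[-1]]): A returns True, B returns True; on URKing(1, 0, [[9, 1], [9, 1], [9]]): A returns False, B raises IndexError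
import Mathlib
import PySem

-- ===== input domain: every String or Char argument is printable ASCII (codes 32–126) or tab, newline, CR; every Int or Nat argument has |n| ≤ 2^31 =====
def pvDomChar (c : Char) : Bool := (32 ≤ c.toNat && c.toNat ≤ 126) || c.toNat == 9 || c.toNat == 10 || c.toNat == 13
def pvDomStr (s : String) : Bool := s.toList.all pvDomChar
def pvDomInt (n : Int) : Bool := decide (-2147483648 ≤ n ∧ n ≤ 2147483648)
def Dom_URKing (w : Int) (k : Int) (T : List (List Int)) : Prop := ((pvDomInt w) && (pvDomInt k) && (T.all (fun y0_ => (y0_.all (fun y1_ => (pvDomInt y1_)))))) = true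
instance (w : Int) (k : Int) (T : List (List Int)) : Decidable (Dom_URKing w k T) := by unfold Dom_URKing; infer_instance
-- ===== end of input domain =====

-- B answers with a bottom-up reachability table instead of A's three-way recursion (alternative algorithm); equal return values on Pre_.

-- ===== PORT A =====
-- leading-digit loop of canMove; for n2 < 0 Python's loop never terminates (excluded by Pre_), we return 0 there
def pvLeadA (x2 n2 : Int) : Int :=
  if _ : n2 = 0 then x2
  else if _ : n2 < 0 then 0
  else pvLeadA (PySem.Int.mod n2 10) (PySem.Int.floordiv n2 10)
termination_by n2.toNat
decreasing_by
  have h1 : 0 < n2 := by omega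
  have h2 : PySem.Int.floordiv n2 10 = n2 / 10 := PySem.Int.floordiv_eq_ediv_of_pos (by omega)
  have _h3 := Int.mul_ediv_add_emod n2 10
  have _h5 : 0 ≤ n2 % 10 := Int.emod_nonneg n2 (by omega)
  have _h6 : n2 % 10 < 10 := Int.emod_lt_of_pos n2 (by omega)
  omega

def canMoveA (n1 n2 : Int) : Bool := decide (PySem.Int.mod n1 10 < pvLeadA 0 n2)

def pvCellA (T : List (List Int)) (i j : Int) : Int :=
  PySem.List.pyGetD (PySem.List.pyGetD T i []) j 0   -- T[i][j]; exact where Python does not raise (guaranteed by Pre_)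

def URKing (w : Int) (k : Int) (T : List (List Int)) : Bool :=
  if w = 0 ∧ k = (T.length : Int) - 1 then true
  else if (T.length : Int) ≤ w ∨ (T.length : Int) ≤ k then false
  else
    (if h1 : (-1 < w - 1 ∧ w - 1 < (T.length : Int)) ∧ (-1 < k + 1 ∧ k + 1 < (T.length : Int)) ∧ canMoveA (pvCellA T w k) (pvCellA T (w - 1) (k + 1)) = true
      then URKing (w - 1) (k + 1) T else false)
    || (if h2 : (-1 < w - 1 ∧ w - 1 < (T.length : Int)) ∧ (-1 < k ∧ k < (T.length : Int)) ∧ canMoveA (pvCellA T w k) (pvCellA T (w - 1) k) = true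
      then URKing (w - 1) k T else false)
    || (if h3 : (-1 < w ∧ w < (T.length : Int)) ∧ (-1 < k + 1 ∧ k + 1 < (T.length : Int)) ∧ canMoveA (pvCellA T w k) (pvCellA T w (k + 1)) = true
      then URKing w (k + 1) T else false)
termination_by (w.toNat + ((T.length : Int) - k).toNat)
decreasing_by all_goals omega

-- ===== PORT B =====
def pvLeadB (lead : Int) : Int :=
  if _ : 10 ≤ lead then pvLeadB (PySem.Int.floordiv lead 10) else lead
termination_by lead.toNat
decreasing_by
  have h2 : PySem.Int.floordiv lead 10 = lead / 10 := PySem.Int.floordiv_eq_ediv_of_pos (by omega)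
  have _h3 := Int.mul_ediv_add_emod lead 10
  have _h5 : 0 ≤ lead % 10 := Int.emod_nonneg lead (by omega)
  have _h6 : lead % 10 < 10 := Int.emod_lt_of_pos lead (by omega)
  omega

def canMoveB (n1 n2 : Int) : Bool := decide (PySem.Int.mod n1 10 < pvLeadB n2)

def pvCellB (T : List (List Int)) (i j : Nat) : Int := (T.getD i []).getD j 0

-- columns j = n-c .. n-1 of table row i, computed right to left (Source B's inner loop)
def pvRowAux (T : List (List Int)) (n i : Nat) (prev : List Bool) : Nat → List Bool
  | 0 => []
  | c + 1 =>
    let j := n - c - 1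
    let rest := pvRowAux T n i prev c
    let v :=
      if i = 0 ∧ j = n - 1 then true
      else
        (decide (1 ≤ i) && decide (j + 1 < n) && canMoveB (pvCellB T i j) (pvCellB T (i - 1) (j + 1)) && prev.getD (j + 1) false)
        || (decide (1 ≤ i) && canMoveB (pvCellB T i j) (pvCellB T (i - 1) j) && prev.getD j false)
        || (decide (j + 1 < n) && canMoveB (pvCellB T i j) (pvCellB T i (j + 1)) && rest.headD false)
    v :: rest

-- rows 0 .. m-1 of the table (Source B's outer loop)
def pvTable (T : List (List Int)) (n : Nat) : Nat → List (List Bool)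
  | 0 => []
  | i + 1 =>
    let t := pvTable T n i
    t ++ [pvRowAux T n i (t.getLastD []) n]

def URKing_alt (w : Int) (k : Int) (T : List (List Int)) : Bool :=
  if 0 ≤ w ∧ w < (T.length : Int) ∧ 0 ≤ k ∧ k < (T.length : Int) then
    ((pvTable T T.length T.length).getD w.toNat []).getD k.toNat false
  else false

-- ===== PRECONDITION & SPEC =====
-- Pre_ keeps the natural domain: either coordinates off the board (where A answers False without reading T),
-- or a board position with a non-negative column, rows at least n entries long and non-negative cells.
-- Outside it A raises IndexError (short rows), loops forever (canMove on a negative cell), or reads cells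
-- through Python's negative-index wraparound (k = -1) — including some inputs where A still returns a value
-- because the offending access or non-terminating loop happens not to be reached.
def Pre_URKing (w : Int) (k : Int) (T : List (List Int)) : Prop :=
  (0 ≤ k ∧ (∀ row ∈ T, T.length ≤ row.length) ∧ (∀ row ∈ T, ∀ x ∈ row, 0 ≤ x))
  ∨ (¬(w = 0 ∧ k = (T.length : Int) - 1) ∧ (w < 0 ∨ (T.length : Int) ≤ w ∨ (T.length : Int) ≤ k))
instance (w : Int) (k : Int) (T : List (List Int)) : Decidable (Pre_URKing w k T) := by
  unfold Pre_URKing; infer_instance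

def pvWitness_URKing : Int × Int × List (List Int) := (1, 0, [[3, 9], [1, 2]])

def Spec_URKing (w : Int) (k : Int) (T : List (List Int)) (out : Bool) : Prop := out = URKing_alt w k T
instance (w : Int) (k : Int) (T : List (List Int)) (out : Bool) : Decidable (Spec_URKing w k T out) := by
  unfold Spec_URKing; infer_instance

-- ===== CLAIM (what is proved, stated in full; the proofs are below) =====
def Claim_equal_URKing : Prop := ∀ (w : Int) (k : Int) (T : List (List Int)), Dom_URKing w k T → Pre_URKing w k T → Spec_URKing w k T (URKing w k T)

-- ===== LEMMAS AND PROOFS =====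

-- ideal value of cell (i, j) of row i given the previous row: the same recurrence as pvRowAux, indexed by column
def pvG (T : List (List Int)) (n i : Nat) (prev : List Bool) (j : Nat) : Bool :=
  if _ : j < n then
    (if i = 0 ∧ j = n - 1 then true
     else
       (decide (1 ≤ i) && decide (j + 1 < n) && canMoveB (pvCellB T i j) (pvCellB T (i - 1) (j + 1)) && prev.getD (j + 1) false)
       || (decide (1 ≤ i) && canMoveB (pvCellB T i j) (pvCellB T (i - 1) j) && prev.getD j false)
       || (decide (j + 1 < n) && canMoveB (pvCellB T i j) (pvCellB T i (j + 1)) && pvG T n i prev (j + 1)))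
  else false
termination_by n - j
decreasing_by omega

def pvRowI (T : List (List Int)) (n : Nat) : Nat → List Bool
  | 0 => pvRowAux T n 0 [] n
  | i + 1 => pvRowAux T n (i + 1) (pvRowI T n i) n

def pvPrev (T : List (List Int)) (n : Nat) : Nat → List Bool
  | 0 => []
  | i + 1 => pvRowI T n i

theorem pvLead_eq (m : Nat) : ∀ n2 : Int, n2.toNat ≤ m → 1 ≤ n2 → ∀ x2, pvLeadA x2 n2 = pvLeadB n2 := by
  induction m with
  | zero => intro n2 h h1 x2; omega
  | succ m ih =>
    intro n2 h h1 x2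
    have hfd : PySem.Int.floordiv n2 10 = n2 / 10 := PySem.Int.floordiv_eq_ediv_of_pos (by omega)
    have hmd : PySem.Int.mod n2 10 = n2 % 10 := PySem.Int.mod_eq_emod_of_pos (by omega)
    have hde := Int.mul_ediv_add_emod n2 10
    have hm0 : 0 ≤ n2 % 10 := Int.emod_nonneg n2 (by omega)
    have hm1 : n2 % 10 < 10 := Int.emod_lt_of_pos n2 (by omega)
    rw [pvLeadA, dif_neg (by omega : ¬ n2 = 0), dif_neg (by omega : ¬ n2 < 0)]
    by_cases hc : 10 ≤ n2
    · rw [hfd, hmd, ih (n2 / 10) (by omega) (by omega)]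
      conv_rhs => rw [pvLeadB, dif_pos hc, hfd]
    · have hq0 : n2 / 10 = 0 := by omega
      rw [hfd, hmd, hq0, pvLeadA, dif_pos rfl, pvLeadB, dif_neg hc]
      omega

theorem canMove_eq (n1 n2 : Int) (h : 0 ≤ n2) : canMoveA n1 n2 = canMoveB n1 n2 := by
  unfold canMoveA canMoveB
  by_cases h0 : n2 = 0
  · subst h0
    rw [pvLeadA, dif_pos rfl, pvLeadB, dif_neg (by omega)]
  · rw [pvLead_eq n2.toNat n2 le_rfl (by omega)]

theorem rowAux_eq_map (T : List (List Int)) (n i : Nat) (prev : List Bool) :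
    ∀ c, c ≤ n → pvRowAux T n i prev c = (List.range c).map (fun d => pvG T n i prev (n - c + d)) := by
  intro c
  induction c with
  | zero => intro _; simp [pvRowAux]
  | succ c ih =>
    intro hc
    have hrest := ih (by omega)
    have hhead : (pvRowAux T n i prev c).headD false = pvG T n i prev (n - c) := by
      cases c with
      | zero =>
        simp only [pvRowAux, List.headD_nil]
        rw [pvG, dif_neg (by omega)]
      | succ c' =>
        rw [hrest]
        simp [List.range_succ_eq_map]
    rw [pvRowAux, List.range_succ_eq_map, List.map_cons, List.map_map]
    congr 1
    · -- head element
      rw [pvG]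
      have hj0 : n - (c + 1) + 0 = n - c - 1 := by omega
      simp only [hj0]
      rw [dif_pos (by omega : n - c - 1 < n)]
      by_cases hb : i = 0 ∧ n - c - 1 = n - 1
      · rw [if_pos hb, if_pos hb]
      · rw [if_neg hb, if_neg hb]
        have hs : n - c - 1 + 1 = n - c := by omega
        rw [hs, hhead]
    · -- tail
      rw [hrest]
      apply List.map_congr_left
      intro d _
      simp only [Function.comp]
      congr 1
      omega

theorem rowAux_getD (T : List (List Int)) (n i : Nat) (prev : List Bool) (j : Nat) :
    (pvRowAux T n i prev n).getD j false = pvG T n i prev j := by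
  rw [rowAux_eq_map T n i prev n le_rfl]
  by_cases hj : j < n
  · rw [List.getD_eq_getElem?_getD, List.getElem?_map, List.getElem?_range hj]
    simp
  · rw [List.getD_eq_getElem?_getD, List.getElem?_eq_none (by simpa using hj)]
    rw [pvG, dif_neg hj]
    rfl

theorem rowI_eq (T : List (List Int)) (n i : Nat) :
    pvRowI T n i = pvRowAux T n i (pvPrev T n i) n := by
  cases i <;> rfl

theorem table_getLastD (T : List (List Int)) (n : Nat) :
    ∀ m, (pvTable T n m).getLastD [] = pvPrev T n m := by
  intro m
  induction m with
  | zero => rfl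
  | succ m ih =>
    rw [pvTable]
    simp only [List.getLastD_concat]
    rw [ih, ← rowI_eq]
    rfl

theorem table_length (T : List (List Int)) (n : Nat) :
    ∀ m, (pvTable T n m).length = m := by
  intro m
  induction m with
  | zero => rfl
  | succ m ih => rw [pvTable]; simp [ih]

theorem table_getD (T : List (List Int)) (n : Nat) :
    ∀ m i, i < m → (pvTable T n m).getD i [] = pvRowI T n i := by
  intro m
  induction m with
  | zero => intro i h; omega
  | succ m ih =>
    intro i h
    rw [pvTable]
    by_cases hi : i < m
    · rw [List.getD_append _ _ _ _ (by rw [table_length]; omega)]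
      exact ih i hi
    · have hie : i = m := by omega
      subst hie
      rw [List.getD_eq_getElem?_getD, List.getElem?_append_right (by rw [table_length])]
      rw [table_length, Nat.sub_self]
      simp only [List.getElem?_cons_zero, Option.getD_some]
      rw [table_getLastD, ← rowI_eq]

theorem rowI_getD (T : List (List Int)) (n i j : Nat) :
    (pvRowI T n i).getD j false = pvG T n i (pvPrev T n i) j := by
  rw [rowI_eq, rowAux_getD]

theorem cellAB (T : List (List Int)) (a b : Nat) : pvCellA T (a : Int) (b : Int) = pvCellB T a b := by
  simp [pvCellA, pvCellB, PySem.List.pyGetD_natCast]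

theorem cell_nonneg (T : List (List Int))
    (hrow : ∀ row ∈ T, T.length ≤ row.length) (hpos : ∀ row ∈ T, ∀ x ∈ row, 0 ≤ x)
    (a b : Nat) (ha : a < T.length) (hb : b < T.length) : 0 ≤ pvCellB T a b := by
  have hmem : T[a] ∈ T := List.getElem_mem ha
  have h2 : b < T[a].length := lt_of_lt_of_le hb (hrow _ hmem)
  rw [pvCellB, List.getD_eq_getElem T [] ha, List.getD_eq_getElem _ _ h2]
  exact hpos _ hmem _ (List.getElem_mem h2)

theorem main_eq (T : List (List Int))
    (hrow : ∀ row ∈ T, T.length ≤ row.length) (hpos : ∀ row ∈ T, ∀ x ∈ row, 0 ≤ x) :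
    ∀ (N i j : Nat), i + (T.length - j) ≤ N → i < T.length → j < T.length →
      URKing (i : Int) (j : Int) T = pvG T T.length i (pvPrev T T.length i) j := by
  intro N
  induction N with
  | zero => intro i j hm hi hj; omega
  | succ N ih =>
    intro i j hm hi hj
    rw [URKing, pvG, dif_pos hj]
    by_cases hb : i = 0 ∧ j = T.length - 1
    · rw [if_pos (by omega : (i : Int) = 0 ∧ (j : Int) = (T.length : Int) - 1), if_pos hb]
    · rw [if_neg (by omega : ¬((i : Int) = 0 ∧ (j : Int) = (T.length : Int) - 1)),
          if_neg (by omega : ¬((T.length : Int) ≤ (i : Int) ∨ (T.length : Int) ≤ (j : Int))),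
          if_neg hb]
      congr 1
      · congr 1
        · -- move up-right
          by_cases h1i : 1 ≤ i
          · by_cases h1j : j + 1 < T.length
            · have hci : ((i : Int) - 1) = ((i - 1 : Nat) : Int) := by omega
              have hcj : ((j : Int) + 1) = ((j + 1 : Nat) : Int) := by push_cast; ring
              rw [hci, hcj, cellAB, cellAB,
                  canMove_eq _ _ (cell_nonneg T hrow hpos (i - 1) (j + 1) (by omega) h1j)]
              by_cases hcm : canMoveB (pvCellB T i j) (pvCellB T (i - 1) (j + 1)) = true
              · rw [dif_pos ⟨⟨by omega, by omega⟩, ⟨by omega, by omega⟩, hcm⟩,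
                    ih (i - 1) (j + 1) (by omega) (by omega) h1j]
                obtain ⟨i', rfl⟩ : ∃ i', i = i' + 1 := ⟨i - 1, by omega⟩
                simp only [Nat.add_sub_cancel] at hcm ⊢
                have hprev : pvPrev T T.length (i' + 1) = pvRowI T T.length i' := rfl
                rw [hprev, rowI_getD]
                simp [h1j, hcm]
              · rw [dif_neg (by rintro ⟨_, _, hc⟩; exact hcm hc)]
                simp [hcm]
            · rw [dif_neg (by rintro ⟨⟨_, _⟩, ⟨_, _⟩, _⟩; omega)]
              simp [h1j]
          · rw [dif_neg (by rintro ⟨⟨_, _⟩, _, _⟩; omega)]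
            simp [h1i]
        · -- move up
          by_cases h1i : 1 ≤ i
          · have hci : ((i : Int) - 1) = ((i - 1 : Nat) : Int) := by omega
            rw [hci, cellAB, cellAB,
                canMove_eq _ _ (cell_nonneg T hrow hpos (i - 1) j (by omega) hj)]
            by_cases hcm : canMoveB (pvCellB T i j) (pvCellB T (i - 1) j) = true
            · rw [dif_pos ⟨⟨by omega, by omega⟩, ⟨by omega, by omega⟩, hcm⟩,
                  ih (i - 1) j (by omega) (by omega) hj]
              obtain ⟨i', rfl⟩ : ∃ i', i = i' + 1 := ⟨i - 1, by omega⟩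
              simp only [Nat.add_sub_cancel] at hcm ⊢
              have hprev : pvPrev T T.length (i' + 1) = pvRowI T T.length i' := rfl
              rw [hprev, rowI_getD]
              simp [hcm]
            · rw [dif_neg (by rintro ⟨_, _, hc⟩; exact hcm hc)]
              simp [hcm]
          · rw [dif_neg (by rintro ⟨⟨_, _⟩, _, _⟩; omega)]
            simp [h1i]
      · -- move right
        by_cases h1j : j + 1 < T.length
        · have hcj : ((j : Int) + 1) = ((j + 1 : Nat) : Int) := by push_cast; ring
          rw [hcj, cellAB, cellAB,
              canMove_eq _ _ (cell_nonneg T hrow hpos i (j + 1) hi h1j)]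
          by_cases hcm : canMoveB (pvCellB T i j) (pvCellB T i (j + 1)) = true
          · rw [dif_pos ⟨⟨by omega, by omega⟩, ⟨by omega, by omega⟩, hcm⟩,
                ih i (j + 1) (by omega) hi h1j]
            simp [h1j, hcm]
          · rw [dif_neg (by rintro ⟨_, _, hc⟩; exact hcm hc)]
            simp [hcm]
        · rw [dif_neg (by rintro ⟨⟨_, _⟩, ⟨_, _⟩, _⟩; omega)]
          simp [h1j]

-- ===== VERDICT (by name: the statement is the Claim_ definition above) =====
theorem URKing_spec : Claim_equal_URKing := by
  intro w k T hdom hpre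
  unfold Spec_URKing URKing_alt
  rcases hpre with ⟨hk0, hrow, hpos⟩ | ⟨hne, hout⟩
  swap
  · have hnin : ¬(0 ≤ w ∧ w < (T.length : Int) ∧ 0 ≤ k ∧ k < (T.length : Int)) := by omega
    rw [if_neg hnin, URKing, if_neg hne]
    by_cases hge : (T.length : Int) ≤ w ∨ (T.length : Int) ≤ k
    · rw [if_pos hge]
    · rw [if_neg hge]
      have hwneg : w < 0 := by omega
      rw [dif_neg (by rintro ⟨⟨a, b⟩, _, _⟩; omega),
          dif_neg (by rintro ⟨⟨a, b⟩, _, _⟩; omega),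
          dif_neg (by rintro ⟨⟨a, b⟩, _, _⟩; omega)]
      rfl
  by_cases hin : 0 ≤ w ∧ w < (T.length : Int) ∧ 0 ≤ k ∧ k < (T.length : Int)
  · rw [if_pos hin, table_getD T T.length T.length w.toNat (by omega), rowI_getD]
    have hw : w = ((w.toNat : Nat) : Int) := by omega
    have hk : k = ((k.toNat : Nat) : Int) := by omega
    conv_lhs => rw [hw, hk]
    exact main_eq T hrow hpos (w.toNat + (T.length - k.toNat)) w.toNat k.toNat le_rfl
      (by omega) (by omega)
  · rw [if_neg hin, URKing, if_neg (by omega : ¬(w = 0 ∧ k = (T.length : Int) - 1))]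
    by_cases hout : (T.length : Int) ≤ w ∨ (T.length : Int) ≤ k
    · rw [if_pos hout]
    · rw [if_neg hout]
      have hwneg : w < 0 := by omega
      rw [dif_neg (by rintro ⟨⟨a, b⟩, _, _⟩; omega),
          dif_neg (by rintro ⟨⟨a, b⟩, _, _⟩; omega),
          dif_neg (by rintro ⟨⟨a, b⟩, _, _⟩; omega)]
      rfl
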